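-- pv_equiv track=rewrite | github.com/0hhanum/algorithm_study | programmers/binary_search/immigration.py | solution
-- ===== SOURCE A (Python) =====
-- def solution(n, times):
--     times.sort()
--     start = 0
--     end = n * times[0]
--     answer = 0
--
--     def check(time):
--         result = 0
--         for i in times:
--             result += time // i
--         return result
--
--     while start <= end:
--         current = (start + end) // 2
--         people = check(current)
--         if people < n:
--             start = current + 1
--         else:
--             end = current - 1
--     return start
-- ===== SOURCE B (Python) =====
-- def solution(n, times):
--     times.sort()
--
--     counts = {}
--     for t in times:
--         counts[t] = counts.get(t, 0) + 1
--
--     def total(time):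
--         return sum(c * (time // v) for v, c in counts.items())
--
--     def bs(lo, hi):
--         if lo > hi:
--             return lo
--         mid = (lo + hi) // 2
--         if total(mid) < n:
--             return bs(mid + 1, hi)
--         return bs(lo, mid - 1)
--
--     return bs(0, n * times[0])
-- ===== Notes on version B (the rewrite author's own statement) =====
-- stated objective: alternative
-- what changed: B builds a dict of gate-time multiplicities once so each binary-search check sums c*(time//v) over distinct gate times instead of rescanning the whole list, and replaces the iterative while-loop binary search with a recursive bisection helper.
-- outside the precondition, e.g. on solution(3, []): A raises IndexError, B raises IndexError; on solution(3, [0, 2]): A raises ZeroDivisionError, B raises ZeroDivisionError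
import Mathlib
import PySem

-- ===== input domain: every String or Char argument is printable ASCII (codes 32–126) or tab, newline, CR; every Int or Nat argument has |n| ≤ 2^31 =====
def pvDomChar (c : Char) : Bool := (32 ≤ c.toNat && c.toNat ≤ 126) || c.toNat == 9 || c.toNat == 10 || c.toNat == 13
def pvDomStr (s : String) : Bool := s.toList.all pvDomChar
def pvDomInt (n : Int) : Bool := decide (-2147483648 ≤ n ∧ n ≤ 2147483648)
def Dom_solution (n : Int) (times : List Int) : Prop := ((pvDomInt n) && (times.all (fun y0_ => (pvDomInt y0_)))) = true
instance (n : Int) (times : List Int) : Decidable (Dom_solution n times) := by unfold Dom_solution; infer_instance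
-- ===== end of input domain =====

-- B replaces A's per-call scan of the whole gate list by a dict of gate-time multiplicities built
-- once (each check sums over DISTINCT gate times weighted by their counts), and replaces the
-- iterative while-loop binary search by a recursive bisection helper; same return value. Both
-- programs sort `times` in place (identical argument mutation); the equivalence proved is about
-- the return value.

-- ===== PORT A =====
-- check(time): accumulator loop over the full times list
def pyCheck (times : List Int) (time : Int) : Int :=
  times.foldl (fun r i => r + PySem.Int.floordiv time i) 0

-- the while-loop, state (start, end)
def loopA (n : Int) (times : List Int) (start e : Int) : Int :=
  if h : start ≤ e then
    let current := PySem.Int.floordiv (start + e) 2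
    if pyCheck times current < n then
      loopA n times (current + 1) e
    else
      loopA n times start (current - 1)
  else start
termination_by (e - start + 1).toNat
decreasing_by
  · have := PySem.Int.floordiv_two_mid_bounds h
    omega
  · have := PySem.Int.floordiv_two_mid_bounds h
    omega

def solution (n : Int) (times : List Int) : Int :=
  let ts := PySem.List.sorted times (fun x => x) false
  loopA n ts 0 (n * PySem.List.pyGetD ts 0 0)

-- ===== PORT B =====
-- counts = {}; for t in times: counts[t] = counts.get(t, 0) + 1
def countsB (times : List Int) : PySem.Dict Int Int :=
  times.foldl (fun d t => d.insert t (d.getD t 0 + 1)) PySem.Dict.empty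

-- total(time) = sum(c * (time // v) for v, c in counts.items())
def totalB (counts : PySem.Dict Int Int) (time : Int) : Int :=
  (counts.items.map (fun p => p.2 * PySem.Int.floordiv time p.1)).sum

-- recursive bisection over the closed interval [lo, hi]
def bsB (n : Int) (counts : PySem.Dict Int Int) (lo hi : Int) : Int :=
  if hgt : lo > hi then lo
  else
    let mid := PySem.Int.floordiv (lo + hi) 2
    if totalB counts mid < n then bsB n counts (mid + 1) hi
    else bsB n counts lo (mid - 1)
termination_by (hi + 1 - lo).toNat
decreasing_by
  · have := PySem.Int.floordiv_two_mid_bounds (by omega : lo ≤ hi)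
    omega
  · have := PySem.Int.floordiv_two_mid_bounds (by omega : lo ≤ hi)
    omega

def solution_alt (n : Int) (times : List Int) : Int :=
  let ts := PySem.List.sorted times (fun x => x) false
  let counts := countsB ts
  bsB n counts 0 (n * PySem.List.pyGetD ts 0 0)

-- ===== PRECONDITION & SPEC =====
-- A raises IndexError on an empty list and ZeroDivisionError when 0 ∈ times and the loop body
-- runs (i.e. n * min(times) ≥ 0); Pre_ admits exactly the inputs on which A returns.
def Pre_solution (n : Int) (times : List Int) : Prop :=
  times ≠ [] ∧ ((0 : Int) ∈ times → n * (times.min?.getD 0) < 0)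
instance (n : Int) (times : List Int) : Decidable (Pre_solution n times) := by
  unfold Pre_solution; infer_instance
def pvWitness_solution : Int × List Int := (2, [1, 2])
def Spec_solution (n : Int) (times : List Int) (out : Int) : Prop := out = solution_alt n times
instance (n : Int) (times : List Int) (out : Int) : Decidable (Spec_solution n times out) := by unfold Spec_solution; infer_instance

-- ===== CLAIM (what is proved, stated in full; the proofs are below) =====
def Claim_equal_solution : Prop := ∀ (n : Int) (times : List Int), Dom_solution n times → Pre_solution n times → Spec_solution n times (solution n times)

-- ===== LEMMAS AND PROOFS =====

-- B's dict-building loop is the standard Counter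
theorem countsB_eq_counter (times : List Int) :
    countsB times = PySem.Dict.counter times :=
  PySem.Dict.foldl_insert_getD_add_one_eq_counter times

-- summing f over a list equals summing count·f over its distinct elements
theorem sum_ofList_count_mul (xs : List Int) (f : Int → Int) :
    ((PySem.Set.ofList xs).map (fun k => (xs.count k : Int) * f k)).sum = (xs.map f).sum := by
  have hnd : (PySem.Set.ofList xs).Nodup := PySem.Set.nodup_ofList xs
  rw [← List.sum_toFinset _ hnd, Finset.sum_list_map_count]
  have htf : (PySem.Set.ofList xs).toFinset = xs.toFinset := by
    ext k; simp [PySem.Set.mem_ofList]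
  rw [htf]
  apply Finset.sum_congr rfl
  intro k _
  simp

-- A's accumulator scan of the whole list equals B's count-weighted sum over distinct gate times
theorem pyCheck_eq_totalB (times : List Int) (time : Int) :
    pyCheck times time = totalB (countsB times) time := by
  unfold pyCheck totalB
  rw [countsB_eq_counter, PySem.Dict.items_counter, List.map_map]
  have h1 : ∀ (l : List Int) (a : Int),
      l.foldl (fun r i => r + PySem.Int.floordiv time i) a
        = a + (l.map (fun i => PySem.Int.floordiv time i)).sum := by
    intro l
    induction l with
    | nil => simp
    | cons x xs ih => intro a; simp [List.foldl, ih, add_assoc]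
  rw [h1]
  have h2 := sum_ofList_count_mul times (fun i => PySem.Int.floordiv time i)
  rw [← h2]
  simp [Function.comp_def]

-- the while loop and the recursive bisection are the same state machine
theorem loopA_eq_bsB (n : Int) (times : List Int) :
    ∀ s e : Int, loopA n times s e = bsB n (countsB times) s e := by
  intro s e
  fun_induction loopA n times s e with
  | case1 s e h current hc ih =>
      rw [bsB, dif_neg (by omega : ¬ s > e)]
      show loopA n times (current + 1) e =
        if totalB (countsB times) current < n then bsB n (countsB times) (current + 1) e
        else bsB n (countsB times) s (current - 1)
      rw [← pyCheck_eq_totalB, if_pos hc]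
      exact ih
  | case2 s e h current hc ih =>
      rw [bsB, dif_neg (by omega : ¬ s > e)]
      show loopA n times s (current - 1) =
        if totalB (countsB times) current < n then bsB n (countsB times) (current + 1) e
        else bsB n (countsB times) s (current - 1)
      rw [← pyCheck_eq_totalB, if_neg hc]
      exact ih
  | case3 s e h =>
      rw [bsB]
      simp [show s > e by omega]

-- ===== VERDICT (by name: the statement is the Claim_ definition above) =====
theorem solution_spec : Claim_equal_solution := by
  intro n times _ _
  unfold Spec_solution solution solution_alt
  exact loopA_eq_bsB n _ 0 _
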